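-- pv_equiv track=rewrite | github.com/BogdanDidukh2003/microcontrollers-part1 | LedInterfaceGUI/main.py | get_led_order_to_indicator_dictionary_from_encoded_data
-- ===== SOURCE A (Python) =====
-- def get_led_order_to_indicator_dictionary_from_encoded_data(encoded_data):
--     led_order_to_pin = dict()
--     for index in range(len(encoded_data)):
--         led_order_to_pin[index] = encoded_data[index]
--     mapped_pins_to_indicators = sorted(led_order_to_pin, key=led_order_to_pin.get)
--     led_order_to_indicator = dict()
--     for pin in range(len(mapped_pins_to_indicators)):
--         led_order_to_indicator[mapped_pins_to_indicators[pin]] = pin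
--
--     return led_order_to_indicator
-- ===== SOURCE B (Python) =====
-- def get_led_order_to_indicator_dictionary_from_encoded_data(encoded_data):
--     n = len(encoded_data)
--     order = [0] * n
--     for i in range(n):
--         rank = 0
--         for j in range(n):
--             if encoded_data[j] < encoded_data[i] or (encoded_data[j] == encoded_data[i] and j < i):
--                 rank += 1
--         order[rank] = i
--     return {order[r]: r for r in range(n)}
-- ===== Notes on version B (the rewrite author's own statement) =====
-- stated objective: alternative
-- what changed: Replaces the sort-based ranking (build index->value dict, stably sort the indices by value, then number them) by direct pairwise rank counting: each index's rank is the number of indices with a smaller value plus the number of earlier indices with an equal value, scattered into a preallocated order array; same dict in the same insertion order, no sort.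
import Mathlib
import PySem

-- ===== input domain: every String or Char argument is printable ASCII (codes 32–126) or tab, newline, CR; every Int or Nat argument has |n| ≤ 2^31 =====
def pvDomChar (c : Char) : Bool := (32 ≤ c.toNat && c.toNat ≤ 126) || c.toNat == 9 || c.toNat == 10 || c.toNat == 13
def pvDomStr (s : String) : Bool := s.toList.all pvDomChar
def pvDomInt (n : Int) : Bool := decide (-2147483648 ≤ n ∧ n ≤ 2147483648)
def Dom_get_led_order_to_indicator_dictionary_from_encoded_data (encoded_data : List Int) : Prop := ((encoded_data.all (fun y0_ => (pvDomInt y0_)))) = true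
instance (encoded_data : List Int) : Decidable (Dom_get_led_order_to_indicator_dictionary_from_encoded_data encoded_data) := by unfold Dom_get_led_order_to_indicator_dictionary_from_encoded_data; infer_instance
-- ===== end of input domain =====

-- B replaces A's sort-based ranking by direct pairwise rank counting scattered into a
-- preallocated order array (objective: alternative algorithm, same O(n^2) cost).

-- ===== PORT A =====
def get_led_order_to_indicator_dictionary_from_encoded_data (encoded_data : List Int) : List (Int × Int) :=
  let led_order_to_pin : PySem.Dict Int Int :=
    (PySem.List.pyRange 0 (PySem.List.len encoded_data) 1).foldl
      (fun d index => d.insert index (PySem.List.pyGetD encoded_data index 0)) PySem.Dict.empty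
  -- sorted(dict, key=dict.get): every key is present, so .get is getD (exact here)
  let mapped_pins_to_indicators : List Int :=
    PySem.List.sorted led_order_to_pin.keys (fun k => led_order_to_pin.getD k 0) false
  let led_order_to_indicator : PySem.Dict Int Int :=
    (PySem.List.pyRange 0 (PySem.List.len mapped_pins_to_indicators) 1).foldl
      (fun d pin => d.insert (PySem.List.pyGetD mapped_pins_to_indicators pin 0) pin) PySem.Dict.empty
  led_order_to_indicator.items

-- ===== PORT B =====
def get_led_order_to_indicator_dictionary_from_encoded_data_alt (encoded_data : List Int) : List (Int × Int) :=
  let n : Int := PySem.List.len encoded_data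
  let order : List Int :=
    (PySem.List.pyRange 0 n 1).foldl (fun order i =>
      let rank : Int := (PySem.List.pyRange 0 n 1).foldl (fun rank j =>
        if PySem.List.pyGetD encoded_data j 0 < PySem.List.pyGetD encoded_data i 0 ∨
           (PySem.List.pyGetD encoded_data j 0 = PySem.List.pyGetD encoded_data i 0 ∧ j < i)
        then rank + 1 else rank) 0
      PySem.List.pySetD order rank i) (PySem.List.pyRepeat [0] n)
  ((PySem.List.pyRange 0 n 1).foldl (fun d r =>
      d.insert (PySem.List.pyGetD order r 0) r) PySem.Dict.empty).items

-- ===== PRECONDITION & SPEC =====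
def Spec_get_led_order_to_indicator_dictionary_from_encoded_data (encoded_data : List Int) (out : List (Int × Int)) : Prop := out = get_led_order_to_indicator_dictionary_from_encoded_data_alt encoded_data
instance (encoded_data : List Int) (out : List (Int × Int)) : Decidable (Spec_get_led_order_to_indicator_dictionary_from_encoded_data encoded_data out) := by unfold Spec_get_led_order_to_indicator_dictionary_from_encoded_data; infer_instance

-- ===== CLAIM (what is proved, stated in full; the proofs are below) =====
def Claim_equal_get_led_order_to_indicator_dictionary_from_encoded_data : Prop := ∀ (encoded_data : List Int), Dom_get_led_order_to_indicator_dictionary_from_encoded_data encoded_data → Spec_get_led_order_to_indicator_dictionary_from_encoded_data encoded_data (get_led_order_to_indicator_dictionary_from_encoded_data encoded_data)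


-- ===== LEMMAS AND PROOFS =====

-- Proof-side names for the intermediate values of the two ports.
def pvD1 (xs : List Int) : PySem.Dict Int Int :=
  (PySem.List.pyRange 0 (PySem.List.len xs) 1).foldl
    (fun d index => d.insert index (PySem.List.pyGetD xs index 0)) PySem.Dict.empty

def pvMs (xs : List Int) : List Int :=
  PySem.List.sorted (pvD1 xs).keys (fun k => (pvD1 xs).getD k 0) false

def pvOrder (xs : List Int) : List Int :=
  (PySem.List.pyRange 0 (PySem.List.len xs) 1).foldl (fun order i =>
    let rank : Int := (PySem.List.pyRange 0 (PySem.List.len xs) 1).foldl (fun rank j =>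
      if PySem.List.pyGetD xs j 0 < PySem.List.pyGetD xs i 0 ∨
         (PySem.List.pyGetD xs j 0 = PySem.List.pyGetD xs i 0 ∧ j < i)
      then rank + 1 else rank) 0
    PySem.List.pySetD order rank i) (PySem.List.pyRepeat [0] (PySem.List.len xs))

lemma pv_A_eq (xs : List Int) :
    get_led_order_to_indicator_dictionary_from_encoded_data xs =
      ((PySem.List.pyRange 0 (PySem.List.len (pvMs xs)) 1).foldl
        (fun d pin => d.insert (PySem.List.pyGetD (pvMs xs) pin 0) pin) PySem.Dict.empty).items := rfl

lemma pv_B_eq (xs : List Int) :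
    get_led_order_to_indicator_dictionary_from_encoded_data_alt xs =
      ((PySem.List.pyRange 0 (PySem.List.len xs) 1).foldl
        (fun d r => d.insert (PySem.List.pyGetD (pvOrder xs) r 0) r) PySem.Dict.empty).items := rfl

-- Stability of the insertion sort: inserting x after all (index-)smaller elements keeps
-- the list ordered by "key strictly smaller, or key equal and original index smaller".
lemma pv_insertBy_pairwise (key : Int → Int) (x : Int) :
    ∀ acc : List Int,
      acc.Pairwise (fun a b => key a < key b ∨ (key a = key b ∧ a < b)) →
      (∀ y ∈ acc, y < x) →
      (PySem.List.insertBy (fun a b => decide (key a < key b)) x acc).Pairwise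
        (fun a b => key a < key b ∨ (key a = key b ∧ a < b))
  | [], _, _ => by
    rw [PySem.List.insertBy.eq_def]
    exact List.pairwise_singleton _ _
  | y :: ys, hp, hlt => by
    rw [PySem.List.insertBy.eq_def]
    simp only [decide_eq_true_eq]
    split_ifs with h
    · refine List.Pairwise.cons ?_ hp
      intro z hz
      rcases List.mem_cons.1 hz with rfl | hz'
      · exact Or.inl h
      · rcases (List.pairwise_cons.1 hp).1 z hz' with h' | ⟨h1, _⟩
        · exact Or.inl (lt_trans h h')
        · exact Or.inl (h1 ▸ h)
    · refine List.Pairwise.cons ?_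
        (pv_insertBy_pairwise key x ys (List.pairwise_cons.1 hp).2
          (fun y' hy' => hlt y' (List.mem_cons_of_mem _ hy')))
      intro z hz
      rcases (PySem.List.mem_insertBy _ _ _ _).1 hz with rfl | hz'
      · have hyx : y < z := hlt y (List.mem_cons_self)
        rcases lt_or_eq_of_le (not_lt.1 h) with h' | h'
        · exact Or.inl h'
        · exact Or.inr ⟨h', hyx⟩
      · exact (List.pairwise_cons.1 hp).1 z hz'

lemma pv_foldl_insertBy_pairwise (key : Int → Int) :
    ∀ (l acc : List Int), l.Pairwise (· < ·) →
      acc.Pairwise (fun a b => key a < key b ∨ (key a = key b ∧ a < b)) →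
      (∀ y ∈ acc, ∀ x ∈ l, y < x) →
      (l.foldl (fun acc x => PySem.List.insertBy (fun a b => decide (key a < key b)) x acc) acc).Pairwise
        (fun a b => key a < key b ∨ (key a = key b ∧ a < b))
  | [], _, _, hacc, _ => hacc
  | x :: t, acc, hl, hacc, hcross => by
    simp only [List.foldl_cons]
    refine pv_foldl_insertBy_pairwise key t _ (List.pairwise_cons.1 hl).2
      (pv_insertBy_pairwise key x acc hacc
        (fun y hy => hcross y hy x (List.mem_cons_self))) ?_
    intro y hy x' hx'
    rcases (PySem.List.mem_insertBy _ _ _ _).1 hy with rfl | hy'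
    · exact (List.pairwise_cons.1 hl).1 x' hx'
    · exact hcross y hy' x' (List.mem_cons_of_mem _ hx')

lemma pv_sorted_pairwise_lex (key : Int → Int) (l : List Int) (hl : l.Pairwise (· < ·)) :
    (PySem.List.sorted l key false).Pairwise
      (fun a b => key a < key b ∨ (key a = key b ∧ a < b)) := by
  rw [PySem.List.sorted_eq_foldl_insertBy]
  exact pv_foldl_insertBy_pairwise key l [] hl (List.Pairwise.nil) (by simp)

-- In a list ordered by a strict (irreflexive, asymmetric) Bool relation, the number of
-- elements below the element at position p is exactly p.
lemma pv_countP_rank (r : Int → Int → Bool)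
    (hirr : ∀ a, r a a = false) (hasym : ∀ a b, r a b = true → r b a = false) :
    ∀ (ms : List Int), ms.Pairwise (fun a b => r a b = true) →
      ∀ (p : Nat) (hp : p < ms.length), ms.countP (fun j => r j ms[p]) = p
  | x :: t, hp, 0, h0 => by
    simp only [List.getElem_cons_zero, List.countP_cons]
    have h1 : t.countP (fun j => r j x) = 0 := by
      refine List.countP_eq_zero.2 (fun j hj => ?_)
      simp [hasym x j ((List.pairwise_cons.1 hp).1 j hj)]
    simp [h1, hirr x]
  | x :: t, hp, p + 1, hps => by
    have hlen : p < t.length := by simpa using Nat.lt_of_succ_lt_succ hps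
    simp only [List.getElem_cons_succ, List.countP_cons]
    rw [pv_countP_rank r hirr hasym t (List.pairwise_cons.1 hp).2 p hlen]
    simp [(List.pairwise_cons.1 hp).1 _ (t.getElem_mem hlen)]

-- Scatter loop 'for i in l: a[f i] = i': positions no element maps to keep their value ...
lemma pv_scatter_length (f : Int → Int) :
    ∀ (l a0 : List Int), (l.foldl (fun a i => PySem.List.pySetD a (f i) i) a0).length = a0.length
  | [], _ => rfl
  | x :: t, a0 => by
    simp only [List.foldl_cons]
    rw [pv_scatter_length f t]
    exact PySem.List.length_pySetD a0 (f x) x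

lemma pv_scatter_miss (f : Int → Int) :
    ∀ (l a0 : List Int) (p : Nat), (∀ i ∈ l, 0 ≤ f i) → (∀ i ∈ l, f i ≠ (p : Int)) →
      (l.foldl (fun a i => PySem.List.pySetD a (f i) i) a0)[p]? = a0[p]?
  | [], _, _, _, _ => rfl
  | x :: t, a0, p, hnn, hne => by
    simp only [List.foldl_cons]
    rw [pv_scatter_miss f t _ p (fun i hi => hnn i (List.mem_cons_of_mem _ hi))
      (fun i hi => hne i (List.mem_cons_of_mem _ hi))]
    rw [PySem.List.pySetD_of_nonneg a0 x (hnn x (List.mem_cons_self))]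
    have h1 := hnn x (List.mem_cons_self)
    have h2 := hne x (List.mem_cons_self)
    exact List.getElem?_set_ne (by omega)

-- ... and each position f i = p receives i, provided f is injective on the (Nodup) list.
lemma pv_scatter_hit (f : Int → Int) :
    ∀ (l a0 : List Int) (p : Nat) (i : Int), l.Nodup →
      (∀ j ∈ l, 0 ≤ f j) → (∀ j ∈ l, ∀ k ∈ l, f j = f k → j = k) →
      i ∈ l → f i = (p : Int) → p < a0.length →
      (l.foldl (fun a i => PySem.List.pySetD a (f i) i) a0)[p]? = some i
  | [], _, _, _, _, _, _, hmem, _, _ => (List.not_mem_nil hmem).elim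
  | x :: t, a0, p, i, hnd, hnn, hinj, hmem, hfi, hplt => by
    simp only [List.foldl_cons]
    rcases List.mem_cons.1 hmem with rfl | hit
    · have hne' : ∀ j ∈ t, f j ≠ (p : Int) := by
        intro j hj hjp
        have hji := hinj j (List.mem_cons_of_mem _ hj) i (List.mem_cons_self)
          (by rw [hjp, hfi])
        exact (List.nodup_cons.1 hnd).1 (hji ▸ hj)
      rw [pv_scatter_miss f t _ p (fun j hj => hnn j (List.mem_cons_of_mem _ hj)) hne']
      rw [PySem.List.pySetD_of_nonneg a0 i (hnn i (List.mem_cons_self))]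
      have hnat : (f i).toNat = p := by
        have := hnn i (List.mem_cons_self); omega
      rw [hnat]
      exact List.getElem?_set_self hplt
    · exact pv_scatter_hit f t _ p i (List.nodup_cons.1 hnd).2
        (fun j hj => hnn j (List.mem_cons_of_mem _ hj))
        (fun j hj k hk => hinj j (List.mem_cons_of_mem _ hj) k (List.mem_cons_of_mem _ hk))
        hit hfi (by rw [PySem.List.length_pySetD]; exact hplt)

lemma pv_d1_items (xs : List Int) :
    (pvD1 xs).items =
      (PySem.List.pyRange 0 (PySem.List.len xs) 1).map (fun a => (a, PySem.List.pyGetD xs a 0)) := by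
  unfold pvD1
  have h := PySem.Dict.items_foldl_insert_fresh (PySem.List.pyRange 0 (PySem.List.len xs) 1)
    (fun a => a) (fun a => PySem.List.pyGetD xs a 0) PySem.Dict.empty
    (fun a _ => PySem.Dict.contains_empty a)
    (by simpa using PySem.List.nodup_pyRange_one 0 (PySem.List.len xs))
  simpa using h

lemma pv_d1_keys (xs : List Int) :
    (pvD1 xs).keys = PySem.List.pyRange 0 (PySem.List.len xs) 1 := by
  simp [PySem.Dict.keys, pv_d1_items, Function.comp_def]

lemma pv_d1_getD (xs : List Int) (k : Int)
    (hk : k ∈ PySem.List.pyRange 0 (PySem.List.len xs) 1) :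
    (pvD1 xs).getD k 0 = PySem.List.pyGetD xs k 0 := by
  refine PySem.Dict.getD_of_mem_items (pvD1 xs) ?_ ?_ 0
  · rw [pv_d1_items]; exact List.mem_map.2 ⟨k, hk, rfl⟩
  · rw [pv_d1_keys]; exact PySem.List.nodup_pyRange_one _ _

lemma pv_ms_perm (xs : List Int) :
    (pvMs xs).Perm (PySem.List.pyRange 0 (PySem.List.len xs) 1) := by
  unfold pvMs
  rw [pv_d1_keys]
  exact PySem.List.sorted_perm _ _ _

lemma pv_len_ms (xs : List Int) : PySem.List.len (pvMs xs) = PySem.List.len xs := by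
  simp [PySem.List.len_eq, (pv_ms_perm xs).length_eq, PySem.List.length_pyRange_one]

lemma pv_ms_pairwise (xs : List Int) :
    (pvMs xs).Pairwise (fun a b =>
      PySem.List.pyGetD xs a 0 < PySem.List.pyGetD xs b 0 ∨
      (PySem.List.pyGetD xs a 0 = PySem.List.pyGetD xs b 0 ∧ a < b)) := by
  have h1 : (pvMs xs).Pairwise (fun a b =>
      (pvD1 xs).getD a 0 < (pvD1 xs).getD b 0 ∨
      ((pvD1 xs).getD a 0 = (pvD1 xs).getD b 0 ∧ a < b)) := by
    unfold pvMs
    rw [pv_d1_keys]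
    exact pv_sorted_pairwise_lex _ _ (PySem.List.pairwise_lt_pyRange_one _ _)
  refine h1.imp_of_mem ?_
  intro a b ha hb hr
  have hms : ∀ y ∈ pvMs xs, y ∈ PySem.List.pyRange 0 (PySem.List.len xs) 1 :=
    fun y hy => (pv_ms_perm xs).subset hy
  rw [pv_d1_getD xs a (hms a ha), pv_d1_getD xs b (hms b hb)] at hr
  exact hr

lemma pv_order_eq_ms (xs : List Int) : pvOrder xs = pvMs xs := by
  unfold pvOrder
  rw [PySem.List.pyRepeat_singleton]
  simp only [PySem.List.foldl_ite_add_one, zero_add, PySem.List.len_eq, Int.toNat_natCast]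
  set Rg : List Int := PySem.List.pyRange 0 (xs.length : Int) 1 with hRg
  set F : Int → Int := fun i =>
    ((Rg.countP (fun j => decide (PySem.List.pyGetD xs j 0 < PySem.List.pyGetD xs i 0 ∨
      (PySem.List.pyGetD xs j 0 = PySem.List.pyGetD xs i 0 ∧ j < i))) : Nat) : Int) with hF
  have hnd : Rg.Nodup := PySem.List.nodup_pyRange_one _ _
  have hperm : (pvMs xs).Perm Rg := by
    have := pv_ms_perm xs
    rwa [PySem.List.len_eq] at this
  have hpw : (pvMs xs).Pairwise (fun a b =>
      (fun a b => decide (PySem.List.pyGetD xs a 0 < PySem.List.pyGetD xs b 0 ∨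
        (PySem.List.pyGetD xs a 0 = PySem.List.pyGetD xs b 0 ∧ a < b))) a b = true) := by
    refine (pv_ms_pairwise xs).imp ?_
    intro a b h
    exact decide_eq_true h
  have hmslen : (pvMs xs).length = xs.length := by
    simpa [hRg, PySem.List.length_pyRange_one] using hperm.length_eq
  -- the value of F at an element of position p in pvMs xs is p
  have hFat : ∀ (p : Nat) (hp : p < (pvMs xs).length), F (pvMs xs)[p] = (p : Int) := by
    intro p hp
    simp only [hF]
    have hcount := pv_countP_rank
      (fun a b => decide (PySem.List.pyGetD xs a 0 < PySem.List.pyGetD xs b 0 ∨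
        (PySem.List.pyGetD xs a 0 = PySem.List.pyGetD xs b 0 ∧ a < b)))
      (fun a => by simp)
      (fun a b h => by
        simp only [decide_eq_true_eq] at h
        simp only [decide_eq_false_iff_not]
        rcases h with h | ⟨h1, h2⟩ <;> rintro (h' | ⟨h1', h2'⟩) <;> omega)
      (pvMs xs) hpw p hp
    rw [← hperm.countP_eq] ; exact_mod_cast congrArg (Nat.cast : Nat → Int) hcount
  have hpos : ∀ i ∈ Rg, ∃ p : Nat, ∃ hp : p < (pvMs xs).length, (pvMs xs)[p] = i := by
    intro i hi
    exact List.mem_iff_getElem.1 (hperm.mem_iff.2 hi)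
  have hFnn : ∀ j ∈ Rg, 0 ≤ F j := by
    intro j _; simp only [hF]; positivity
  have hinj : ∀ j ∈ Rg, ∀ k ∈ Rg, F j = F k → j = k := by
    intro j hj k hk hjk
    obtain ⟨p, hp, hpj⟩ := hpos j hj
    obtain ⟨q, hq, hqk⟩ := hpos k hk
    have h1 := hFat p hp; rw [hpj] at h1
    have h2 := hFat q hq; rw [hqk] at h2
    have hpq : p = q := by omega
    subst hpq
    rw [← hpj, ← hqk]
  refine List.ext_getElem? ?_
  intro p
  by_cases hp : p < xs.length
  · rw [pv_scatter_hit F Rg _ p ((pvMs xs)[p]'(by omega)) hnd hFnn hinj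
      (hperm.subset (List.getElem_mem _)) (hFat p (by omega)) (by simpa using hp)]
    rw [List.getElem?_eq_getElem (by omega)]
  · rw [List.getElem?_eq_none (by rw [pv_scatter_length]; simpa using not_lt.1 hp),
      List.getElem?_eq_none (by omega)]

-- ===== VERDICT (by name: the statement is the Claim_ definition above) =====
theorem get_led_order_to_indicator_dictionary_from_encoded_data_spec : Claim_equal_get_led_order_to_indicator_dictionary_from_encoded_data := by
  intro xs _
  unfold Spec_get_led_order_to_indicator_dictionary_from_encoded_data
  rw [pv_A_eq, pv_B_eq, pv_order_eq_ms, pv_len_ms]
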